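-- pv_equiv track=rewrite | github.com/agenta2z/RichPythonUtils | src/rich_python_utils/production_utils/greenwich_data/_common/greenwich_common_data_process.py | generate_hypothesis
-- ===== SOURCE A (Python) =====
-- from collections import defaultdict
--
-- def generate_hypothesis(domain, intent, token_label_text):
--     if not token_label_text:
--         if not intent:
--             return domain
--         else:
--             return domain + '|' + intent
--     tokens_by_label = defaultdict(list)
--     tokens = token_label_text.split(' ')
--     for token in tokens:
--         text_and_label = token.split('|')
--         if len(text_and_label) != 2:
--             continue
--         text, label = text_and_label
--         if label == 'Other':
--             continue
--         tokens_by_label[label].append(text)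
--     return '|'.join(
--         [domain, intent]
--         + ["{}:{}".format(x[0], ' '.join(x[1])) for x in sorted(tokens_by_label.items())]
--     )
-- ===== SOURCE B (Python) =====
-- def generate_hypothesis(domain, intent, token_label_text):
--     if not token_label_text:
--         if not intent:
--             return domain
--         return domain + '|' + intent
--     pairs = []
--     for token in token_label_text.split(' '):
--         parts = token.split('|')
--         if len(parts) == 2 and parts[1] != 'Other':
--             pairs.append((parts[1], parts[0]))
--     pairs.sort(key=lambda p: p[0])  # stable: texts keep their original order within a label
--     segments = []
--     i = 0
--     while i < len(pairs):
--         j = i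
--         while j < len(pairs) and pairs[j][0] == pairs[i][0]:
--             j += 1
--         segments.append(pairs[i][0] + ':' + ' '.join(p[1] for p in pairs[i:j]))
--         i = j
--     return '|'.join([domain, intent] + segments)
-- ===== Notes on version B (the rewrite author's own statement) =====
-- stated objective: idiomatic
-- what changed: Replaces the defaultdict grouping plus whole-item sort with a flat (label,text) pair list, a stable sort keyed on the label alone, and a single consecutive-run scan that emits each 'label:texts' segment.
import Mathlib
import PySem

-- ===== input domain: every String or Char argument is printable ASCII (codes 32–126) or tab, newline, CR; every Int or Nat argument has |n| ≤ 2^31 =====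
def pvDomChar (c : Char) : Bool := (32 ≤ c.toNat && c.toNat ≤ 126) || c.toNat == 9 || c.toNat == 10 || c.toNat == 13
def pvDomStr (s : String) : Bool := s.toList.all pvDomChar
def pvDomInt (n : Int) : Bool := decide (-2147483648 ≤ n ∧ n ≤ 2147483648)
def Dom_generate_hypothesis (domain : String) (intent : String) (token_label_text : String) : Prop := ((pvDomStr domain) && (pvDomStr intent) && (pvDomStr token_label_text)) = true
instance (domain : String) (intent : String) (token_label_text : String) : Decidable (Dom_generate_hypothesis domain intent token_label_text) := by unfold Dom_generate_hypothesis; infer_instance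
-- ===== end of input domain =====

-- B replaces A's defaultdict grouping + whole-item sort by a flat (label,text) list, a stable
-- sort keyed on the label alone, and one consecutive-run scan emitting the segments (objective:
-- idiomatic/alternative decomposition, same results).

-- ===== PORT A =====
-- 'token.split("|")' / 'token_label_text.split(" ")': the separator is a non-empty literal, so
-- PySem.Str.split? is always 'some'; '.getD []' never fires.
def generate_hypothesis (domain : String) (intent : String) (token_label_text : String) : String :=
  if token_label_text = "" then
    if intent = "" then domain
    else domain ++ "|" ++ intent
  else
    let tokens := (PySem.Str.split? token_label_text " ").getD []
    let tokens_by_label : PySem.Dict String (List String) :=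
      tokens.foldl (fun d token =>
        let text_and_label := (PySem.Str.split? token "|").getD []
        if text_and_label.length ≠ 2 then d
        else
          let text := text_and_label[0]!
          let label := text_and_label[1]!
          if label = "Other" then d
          else d.modify label [] (fun ts => ts ++ [text])) PySem.Dict.empty
    -- sorted(tokens_by_label.items()): dict keys are distinct, so Python's tuple comparison
    -- never reaches the second component — sorting by the key alone is exact here.
    PySem.Str.join "|"
      ([domain, intent] ++
        (PySem.List.sorted tokens_by_label.items (fun x => x.1)).map
          (fun x => x.1 ++ ":" ++ PySem.Str.join " " x.2))

-- ===== PORT B =====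
-- the two nested while-loops of Source B: peel the run of pairs sharing the head's label, emit its
-- segment, continue after the run.
def pvGroups : List (String × String) → List String
  | [] => []
  | (l, t) :: rest =>
    let same := rest.takeWhile (fun p => p.1 == l)
    let others := rest.dropWhile (fun p => p.1 == l)
    (l ++ ":" ++ PySem.Str.join " " (t :: same.map (fun p => p.2))) :: pvGroups others
termination_by ys => ys.length
decreasing_by
  simp only [List.length_cons]
  exact Nat.lt_succ_of_le (List.length_dropWhile_le _ _)

def generate_hypothesis_alt (domain : String) (intent : String) (token_label_text : String) : String :=
  if token_label_text = "" then
    if intent = "" then domain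
    else domain ++ "|" ++ intent
  else
    let pairs := ((PySem.Str.split? token_label_text " ").getD []).foldl
      (fun acc token =>
        let parts := (PySem.Str.split? token "|").getD []
        if parts.length = 2 ∧ parts[1]! ≠ "Other" then acc ++ [(parts[1]!, parts[0]!)]
        else acc) []
    PySem.Str.join "|" ([domain, intent] ++ pvGroups (PySem.List.sorted pairs (fun p => p.1)))

-- ===== PRECONDITION & SPEC =====
def Spec_generate_hypothesis (domain : String) (intent : String) (token_label_text : String) (out : String) : Prop := out = generate_hypothesis_alt domain intent token_label_text
instance (domain : String) (intent : String) (token_label_text : String) (out : String) : Decidable (Spec_generate_hypothesis domain intent token_label_text out) := by unfold Spec_generate_hypothesis; infer_instance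

-- ===== CLAIM (what is proved, stated in full; the proofs are below) =====
def Claim_equal_generate_hypothesis : Prop := ∀ (domain : String) (intent : String) (token_label_text : String), Dom_generate_hypothesis domain intent token_label_text → Spec_generate_hypothesis domain intent token_label_text (generate_hypothesis domain intent token_label_text)

-- ===== LEMMAS AND PROOFS =====

/-- Both loops keep exactly the tokens that split into two parts with a label ≠ "Other";
    `pvParse` names that (label, text) extraction. -/
def pvParse (token : String) : Option (String × String) :=
  let parts := (PySem.Str.split? token "|").getD []
  if parts.length = 2 ∧ parts[1]! ≠ "Other" then some (parts[1]!, parts[0]!) else none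

/-- A's grouping loop is the canonical modify-append fold over the parsed pairs. -/
lemma pvLoopA (tokens : List String) (d : PySem.Dict String (List String)) :
    tokens.foldl (fun d token =>
        let text_and_label := (PySem.Str.split? token "|").getD []
        if text_and_label.length ≠ 2 then d
        else
          let text := text_and_label[0]!
          let label := text_and_label[1]!
          if label = "Other" then d
          else d.modify label [] (fun ts => ts ++ [text])) d
      = (tokens.filterMap pvParse).foldl (fun d p => d.modify p.1 [] (fun ts => ts ++ [p.2])) d := by
  induction tokens generalizing d with
  | nil => rfl
  | cons tok rest ih =>
    simp only [List.foldl_cons, List.filterMap_cons]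
    rcases hsp : (PySem.Str.split? tok "|").getD [] with _ | ⟨a, _ | ⟨b, _ | ⟨c, cs⟩⟩⟩
    · have ihd := ih d; simp [pvParse, hsp] at ihd ⊢; exact ihd
    · have ihd := ih d; simp [pvParse, hsp] at ihd ⊢; exact ihd
    · by_cases hb : b = "Other"
      · have ihd := ih d; simp [pvParse, hsp, hb] at ihd ⊢; exact ihd
      · have ihd := ih (d.modify b [] fun ts => ts ++ [a])
        simp [pvParse, hsp, hb] at ihd ⊢; exact ihd
    · have ihd := ih d; simp [pvParse, hsp] at ihd ⊢; exact ihd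

/-- B's collecting loop appends exactly the parsed pairs. -/
lemma pvLoopB (tokens : List String) (acc : List (String × String)) :
    tokens.foldl (fun acc token =>
        let parts := (PySem.Str.split? token "|").getD []
        if parts.length = 2 ∧ parts[1]! ≠ "Other" then acc ++ [(parts[1]!, parts[0]!)]
        else acc) acc
      = acc ++ tokens.filterMap pvParse := by
  induction tokens generalizing acc with
  | nil => simp
  | cons tok rest ih =>
    simp only [List.foldl_cons, List.filterMap_cons]
    rcases hsp : (PySem.Str.split? tok "|").getD [] with _ | ⟨a, _ | ⟨b, _ | ⟨c, cs⟩⟩⟩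
    · have ihd := ih acc; simp [pvParse, hsp] at ihd ⊢; exact ihd
    · have ihd := ih acc; simp [pvParse, hsp] at ihd ⊢; exact ihd
    · by_cases hb : b = "Other"
      · have ihd := ih acc; simp [pvParse, hsp, hb] at ihd ⊢; exact ihd
      · have ihd := ih (acc ++ [(b, a)])
        simp [pvParse, hsp, hb] at ihd ⊢; exact ihd
    · have ihd := ih acc; simp [pvParse, hsp] at ihd ⊢; exact ihd

/-- The dict built by the modify-append fold, as a list: first occurrences of the labels,
    each with all its texts in order. -/
lemma pvDictItems (P : List (String × String)) :
    (P.foldl (fun d p => d.modify p.1 [] (fun ts => ts ++ [p.2])) PySem.Dict.empty).items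
      = (PySem.List.dedup (P.map (fun p => p.1))).map
          (fun l => (l, (P.filter (fun p => p.1 == l)).map (fun p => p.2))) := by
  have hnd : (P.foldl (fun d p => d.modify p.1 [] (fun ts => ts ++ [p.2])) PySem.Dict.empty).keys.Nodup :=
    PySem.Dict.nodup_keys_foldl_modify_key P (fun p => p.1) [] (fun _ p => fun ts => ts ++ [p.2])
      PySem.Dict.empty PySem.Dict.nodup_keys_empty
  have hkeys : (P.foldl (fun d p => d.modify p.1 [] (fun ts => ts ++ [p.2])) PySem.Dict.empty).keys
      = PySem.List.dedup (P.map (fun p => p.1)) := by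
    rw [PySem.Dict.keys_foldl_modify_key P (fun p => p.1) [] (fun _ p => fun ts => ts ++ [p.2])
        PySem.Dict.empty, PySem.Dict.keys_empty, PySem.Set.update_nil_left,
        PySem.List.dedup_eq_ofList]
  rw [PySem.Dict.items_eq_map_keys _ hnd [], hkeys]
  refine List.map_congr_left (fun l _ => ?_)
  rw [PySem.Dict.getD_foldl_modify_append P PySem.Dict.empty l, PySem.Dict.getD_empty,
    List.nil_append]

/-- Sorting the dict items by their (distinct) keys yields the sorted distinct labels, decorated. -/
lemma pvSortedItems (P : List (String × String)) :
    PySem.List.sorted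
        (P.foldl (fun d p => d.modify p.1 [] (fun ts => ts ++ [p.2])) PySem.Dict.empty).items
        (fun x => x.1)
      = (PySem.List.sorted (PySem.List.dedup (P.map (fun p => p.1))) (fun x => x)).map
          (fun l => (l, (P.filter (fun p => p.1 == l)).map (fun p => p.2))) := by
  apply PySem.List.sorted_eq_of_perm_of_pairwise_lt
  · rw [pvDictItems]
    exact (PySem.List.sorted_perm (PySem.List.dedup (P.map (fun p => p.1))) (fun x => x) false).map _
  · refine List.Pairwise.map _ (fun a b hab => hab) ?_
    rw [PySem.List.dedup_eq_ofList]
    exact PySem.List.sorted_ofList_pairwise_lt _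

/-- Inserting into a key-sorted list: the filter at any one label gains the new element at the
    end of its group (or is unchanged). -/
lemma pvInsertByFilter (x : String × String) (s : List (String × String))
    (hs : s.Pairwise (fun a b => a.1 ≤ b.1)) (l : String) :
    (PySem.List.insertBy (fun a b => decide (a.1 < b.1)) x s).filter (fun p => p.1 == l)
      = if x.1 == l then s.filter (fun p => p.1 == l) ++ [x]
        else s.filter (fun p => p.1 == l) := by
  induction s with
  | nil => by_cases hxl : x.1 == l <;> simp [PySem.List.insertBy, hxl]
  | cons y ys ih =>
    rw [List.pairwise_cons] at hs
    obtain ⟨hy, hs'⟩ := hs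
    by_cases hlt : x.1 < y.1
    · have hnil : ∀ z ∈ y :: ys, ¬(z.1 == l) → True := fun _ _ _ => trivial
      by_cases hxl : x.1 == l
      · have hx : x.1 = l := by simpa using hxl
        have hnone : (y :: ys).filter (fun p => p.1 == l) = [] := by
          rw [List.filter_eq_nil_iff]
          intro z hz
          have : y.1 ≤ z.1 := by
            rcases List.mem_cons.mp hz with h | h
            · exact le_of_eq (h ▸ rfl)
            · exact hy z h
          have : x.1 < z.1 := lt_of_lt_of_le hlt this
          simp only [beq_iff_eq]
          intro hzl
          exact absurd (hx ▸ hzl : z.1 = x.1) (ne_of_gt this)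
        simp [PySem.List.insertBy, hlt, hxl, hnone]
      · simp [PySem.List.insertBy, hlt, hxl]
    · have hins : PySem.List.insertBy (fun a b => decide (a.1 < b.1)) x (y :: ys)
          = y :: PySem.List.insertBy (fun a b => decide (a.1 < b.1)) x ys := by
        simp [PySem.List.insertBy, hlt]
      rw [hins, List.filter_cons, ih hs', List.filter_cons]
      by_cases hxl : x.1 == l <;> by_cases hyl : y.1 == l <;> simp [hxl, hyl]

/-- Stability of the sort keyed on the label: each label's pairs keep their original order. -/
lemma pvSortedFilter (P : List (String × String)) (l : String) :
    (PySem.List.sorted P (fun p => p.1)).filter (fun p => p.1 == l)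
      = P.filter (fun p => p.1 == l) := by
  induction P using List.reverseRecOn with
  | nil => simp [PySem.List.sorted_eq_foldl_insertBy]
  | append_singleton Q x ih =>
    have h1 : PySem.List.sorted (Q ++ [x]) (fun p => p.1)
        = PySem.List.insertBy (fun a b => decide (a.1 < b.1)) x (PySem.List.sorted Q (fun p => p.1)) := by
      rw [PySem.List.sorted_eq_foldl_insertBy (Q ++ [x]), List.foldl_append,
        ← PySem.List.sorted_eq_foldl_insertBy Q]
      rfl
    rw [h1, pvInsertByFilter x _ (PySem.List.sorted_pairwise Q (fun p => p.1)) l, List.filter_append]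
    by_cases hxl : x.1 == l <;> simp [hxl, ih]

/-- The run-scan over a key-sorted pair list produces one segment per distinct label, in the
    order of any strictly increasing enumeration S of the labels. -/
lemma pvGroupsEq (S : List String) : ∀ (ys : List (String × String)),
    ys.Pairwise (fun a b => a.1 ≤ b.1) → S.Pairwise (· < ·) →
    (∀ l, l ∈ S ↔ l ∈ ys.map (fun p => p.1)) →
    pvGroups ys = S.map (fun l =>
      l ++ ":" ++ PySem.Str.join " " ((ys.filter (fun p => p.1 == l)).map (fun p => p.2))) := by
  induction S with
  | nil =>
    intro ys _ _ h3
    cases ys with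
    | nil => simp [pvGroups]
    | cons p rest =>
      exact absurd ((h3 p.1).mpr (List.mem_map.mpr ⟨p, List.mem_cons_self, rfl⟩)) (List.not_mem_nil)
  | cons s S' ih =>
    intro ys h1 h2 h3
    cases ys with
    | nil =>
      exact absurd ((h3 s).mp List.mem_cons_self) (by simp)
    | cons hd rest =>
      obtain ⟨l, t⟩ := hd
      rw [List.pairwise_cons] at h1
      obtain ⟨hle, h1'⟩ := h1
      rw [List.pairwise_cons] at h2
      obtain ⟨hsS', h2'⟩ := h2
      -- the head's label is the least distinct label, i.e. the head of S
      have hls : l = s := by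
        have hlmem : l ∈ s :: S' := (h3 l).mpr (List.mem_map.mpr ⟨(l, t), List.mem_cons_self, rfl⟩)
        rcases List.mem_cons.mp hlmem with h | h
        · exact h
        · exfalso
          have hsl : s < l := hsS' l h
          have hsmem : s ∈ (((l, t) :: rest).map (fun p => p.1)) := (h3 s).mp List.mem_cons_self
          rcases List.mem_map.mp hsmem with ⟨p, hp, hps⟩
          rcases List.mem_cons.mp hp with h' | h'
          · rw [h'] at hps
            simp only [] at hps
            exact lt_irrefl s (hps ▸ hsl)
          · exact absurd (hps ▸ hle p h' : l ≤ s) (not_le.mpr hsl)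
      subst hls
      set same := rest.takeWhile (fun p => p.1 == l) with hsamedef
      set others := rest.dropWhile (fun p => p.1 == l) with hothersdef
      have hrest : same ++ others = rest := List.takeWhile_append_dropWhile
      have hsame : ∀ p ∈ same, p.1 = l := fun p hp => by
        simpa using List.mem_takeWhile_imp hp
      have hothers_pair : others.Pairwise (fun a b => a.1 ≤ b.1) :=
        List.Pairwise.sublist (List.dropWhile_sublist _) h1'
      have hother_keys : ∀ p ∈ others, l < p.1 := by
        cases hoth : others with
        | nil => simp
        | cons o os =>
          have hohead : ¬(o.1 == l) = true := by
            have := List.head?_dropWhile_not (fun p => (p.1 == l)) rest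
            rw [← hothersdef, hoth] at this
            simp only [List.head?_cons] at this
            simp [this]
          have homem : o ∈ rest :=
            (List.dropWhile_sublist (fun p => p.1 == l)).subset
              (by rw [← hothersdef, hoth]; exact List.mem_cons_self)
          have holt : l < o.1 := by
            rcases lt_or_eq_of_le (hle o homem) with h | h
            · exact h
            · exact absurd (by simp [h.symm]) hohead
          intro p hp
          rcases List.mem_cons.mp hp with h | h
          · exact h ▸ holt
          · have hop := hothers_pair
            rw [hoth] at hop
            rcases List.pairwise_cons.mp hop with ⟨ho2, _⟩
            exact lt_of_lt_of_le holt (ho2 p h)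
      have hfilter_l : ((l, t) :: rest).filter (fun p => p.1 == l) = (l, t) :: same := by
        rw [List.filter_cons]
        simp only [beq_self_eq_true, if_pos]
        congr 1
        rw [← hrest, List.filter_append]
        have hf1 : same.filter (fun p => p.1 == l) = same :=
          List.filter_eq_self.mpr (fun p hp => by simp [hsame p hp])
        have hf2 : others.filter (fun p => p.1 == l) = [] :=
          List.filter_eq_nil_iff.mpr (fun p hp => by simp [ne_of_gt (hother_keys p hp)])
        rw [hf1, hf2, List.append_nil]
      have hmem' : ∀ l', l' ∈ S' ↔ l' ∈ others.map (fun p => p.1) := by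
        intro l'
        constructor
        · intro hl'
          have hlt : l < l' := hsS' l' hl'
          have hmap : l' ∈ ((l, t) :: rest).map (fun p => p.1) :=
            (h3 l').mp (List.mem_cons_of_mem _ hl')
          rcases List.mem_map.mp hmap with ⟨p, hp, hps⟩
          rcases List.mem_cons.mp hp with h | h
          · rw [h] at hps
            simp only [] at hps
            exact absurd hps (ne_of_lt hlt)
          · rw [← hrest] at h
            rcases List.mem_append.mp h with h' | h'
            · exact absurd (hps ▸ hsame p h' : l' = l) (ne_of_gt hlt)
            · exact List.mem_map.mpr ⟨p, h', hps⟩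
        · intro hl'
          rcases List.mem_map.mp hl' with ⟨p, hp, hps⟩
          have hpr : p ∈ rest := (List.dropWhile_sublist _).subset (hothersdef ▸ hp)
          have hpm : p.1 ∈ l :: S' :=
            (h3 p.1).mpr (List.mem_map.mpr ⟨p, List.mem_cons_of_mem _ hpr, rfl⟩)
          rcases List.mem_cons.mp hpm with h | h
          · exact absurd h (ne_of_gt (hother_keys p hp))
          · exact hps ▸ h
      have hunf : pvGroups ((l, t) :: rest)
          = (l ++ ":" ++ PySem.Str.join " " (t :: same.map (fun p => p.2))) :: pvGroups others := by
        rw [pvGroups]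
      rw [hunf, ih others hothers_pair h2' hmem', List.map_cons]
      congr 1
      · rw [hfilter_l]
        simp
      · refine List.map_congr_left (fun l' hl' => ?_)
        have hlt : l < l' := hsS' l' hl'
        have hfl' : ((l, t) :: rest).filter (fun p => p.1 == l') = others.filter (fun p => p.1 == l') := by
          rw [List.filter_cons, ← hrest, List.filter_append]
          have hf1 : same.filter (fun p => p.1 == l') = [] :=
            List.filter_eq_nil_iff.mpr (fun p hp => by simp [hsame p hp, ne_of_lt hlt])
          have hcond : (((l, t) : String × String).1 == l') = false := by
            simp [ne_of_lt hlt]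
          rw [hf1, List.nil_append, hcond]
          simp
        rw [hfl']

-- ===== VERDICT (by name: the statement is the Claim_ definition above) =====
set_option maxHeartbeats 1000000 in
theorem generate_hypothesis_spec : Claim_equal_generate_hypothesis := by
  intro domain intent tlt _
  unfold Spec_generate_hypothesis generate_hypothesis generate_hypothesis_alt
  by_cases h0 : tlt = ""
  · simp [h0]
  · simp only [h0, if_false]
    rw [pvLoopA, pvLoopB]
    simp only [List.nil_append]
    set tokens := (PySem.Str.split? tlt " ").getD [] with htok
    set P := tokens.filterMap pvParse with hP
    congr 1
    rw [pvSortedItems P, List.map_map]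
    rw [pvGroupsEq (PySem.List.sorted (PySem.List.dedup (P.map (fun p => p.1))) (fun x => x))
          (PySem.List.sorted P (fun p => p.1))
          (PySem.List.sorted_pairwise P (fun p => p.1))
          (by rw [PySem.List.dedup_eq_ofList]; exact PySem.List.sorted_ofList_pairwise_lt _)
          (by
            intro l
            rw [PySem.List.mem_sorted, PySem.List.mem_dedup]
            exact (((PySem.List.sorted_perm P (fun p => p.1) false).map (fun p => p.1)).mem_iff).symm)]
    congr 1
    refine List.map_congr_left (fun l _ => ?_)
    simp only [Function.comp_apply]
    rw [pvSortedFilter]
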